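-- pv_equiv track=rewrite | github.com/shelbysanz/leetcode | ggp-problems/test_longest_increasing_path_in_matrix.py | longestIncreasingPathFromStart
-- ===== SOURCE A (Python) =====
-- def longestIncreasingPathFromStart(matrix):
--     n = len(matrix)
--     m = len(matrix[0])
--
--     dp = [[0] * m for _ in range(n)]
--
--     def dfs(r, c) -> int:
--         if dp[r][c] != 0:
--             return dp[r][c]
--
--         curr = matrix[r][c]
--         max_path = 1
--
--         directions = [(1, 0), (-1, 0), (0, 1), (0, -1)]
--         for row_dir, col_dir in directions:
--             row_coor, col_coor = r + row_dir, c + col_dir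
--             if 0 <= row_coor < n and 0 <= col_coor < m:
--                 if matrix[row_coor][col_coor] > curr:
--                     max_path = max(max_path, 1 + dfs(row_coor, col_coor))
--
--         dp[r][c] = max_path
--         return dp[r][c]
--
--     return dfs(0, 0)
-- ===== SOURCE B (Python) =====
-- def longestIncreasingPathFromStart(matrix):
--     n = len(matrix)
--     m = len(matrix[0])
--     dp = [[0] * m for _ in range(n)]
--     cells = sorted(((r, c) for r in range(n) for c in range(m)),
--                    key=lambda rc: matrix[rc[0]][rc[1]], reverse=True)
--     for r, c in cells:
--         best = 1
--         for nr, nc in ((r + 1, c), (r - 1, c), (r, c + 1), (r, c - 1)):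
--             if 0 <= nr < n and 0 <= nc < m and matrix[nr][nc] > matrix[r][c]:
--                 best = max(best, 1 + dp[nr][nc])
--         dp[r][c] = best
--     return dp[0][0]
-- ===== Notes on version B (the rewrite author's own statement) =====
-- stated objective: alternative
-- what changed: Replaces the memoized recursive DFS with an iterative DP: all cells are sorted by value in descending order and the dp table is filled in one pass (each cell = 1 + max dp of strictly greater in-bounds neighbours), returning dp[0][0].
-- outside the precondition, e.g. on longestIncreasingPathFromStart([[3], [1], []]): A returns 1, B raises IndexError
import Mathlib
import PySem

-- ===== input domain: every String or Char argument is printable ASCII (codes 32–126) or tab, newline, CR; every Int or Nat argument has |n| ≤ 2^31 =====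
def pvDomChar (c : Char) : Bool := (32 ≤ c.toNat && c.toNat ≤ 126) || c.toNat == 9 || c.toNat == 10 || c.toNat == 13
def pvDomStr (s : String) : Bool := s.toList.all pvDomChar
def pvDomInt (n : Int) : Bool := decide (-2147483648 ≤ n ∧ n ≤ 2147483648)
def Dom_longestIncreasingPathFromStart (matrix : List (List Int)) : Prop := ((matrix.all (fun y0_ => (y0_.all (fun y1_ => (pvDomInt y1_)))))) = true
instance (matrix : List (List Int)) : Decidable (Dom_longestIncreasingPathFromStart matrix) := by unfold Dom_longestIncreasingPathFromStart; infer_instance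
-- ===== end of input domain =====

-- B replaces A's memoized recursive DFS by an iterative DP over the cells sorted by value
-- in descending order (objective: alternative algorithm, similar cost); return values only.

-- ===== PORT A =====
-- matrix[r][c] for indices already checked 0 ≤ · < len (exact there; out-of-range excluded by Pre_)
def mget (g : List (List Int)) (r c : Int) : Int := (g.getD r.toNat []).getD c.toNat 0
-- dp[r][c] = v (in-place row update, exact for checked in-range indices)
def mset (g : List (List Int)) (r c : Int) (v : Int) : List (List Int) :=
  g.set r.toNat ((g.getD r.toNat []).set c.toNat v)

def dirsA : List (Int × Int) := [(1, 0), (-1, 0), (0, 1), (0, -1)]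

-- A's inner `dfs` with the mutable dp table threaded through; fuel only makes the
-- recursion structural (n*m+1 always suffices: path values strictly increase).
def dfsA (A : List (List Int)) (n m : Int) : Nat → Int → Int → List (List Int) → Int × List (List Int)
  | 0, _, _, dp => (0, dp)
  | fuel+1, r, c, dp =>
    if mget dp r c ≠ 0 then (mget dp r c, dp)
    else
      let curr := mget A r c
      let res := dirsA.foldl (fun acc d =>
          if 0 ≤ r + d.1 ∧ r + d.1 < n ∧ 0 ≤ c + d.2 ∧ c + d.2 < m then
            if mget A (r + d.1) (c + d.2) > curr then
              let p := dfsA A n m fuel (r + d.1) (c + d.2) acc.2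
              (max acc.1 (1 + p.1), p.2)
            else acc
          else acc) (1, dp)
      (res.1, mset res.2 r c res.1)

def longestIncreasingPathFromStart (matrix : List (List Int)) : Int :=
  let n := matrix.length
  let m := (matrix.getD 0 []).length
  let dp := List.replicate n (List.replicate m (0 : Int))
  (dfsA matrix (n : Int) (m : Int) (n * m + 1) 0 0 dp).1

-- ===== PORT B =====
def nbrs (r c : Int) : List (Int × Int) := [(r + 1, c), (r - 1, c), (r, c + 1), (r, c - 1)]

def bestOf (A : List (List Int)) (n m : Int) (dp : List (List Int)) (r c : Int) : Int :=
  (nbrs r c).foldl (fun best nb =>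
    if 0 ≤ nb.1 ∧ nb.1 < n ∧ 0 ≤ nb.2 ∧ nb.2 < m ∧ mget A nb.1 nb.2 > mget A r c
    then max best (1 + mget dp nb.1 nb.2) else best) 1

def longestIncreasingPathFromStart_alt (matrix : List (List Int)) : Int :=
  let n := matrix.length
  let m := (matrix.getD 0 []).length
  let dp0 := List.replicate n (List.replicate m (0 : Int))
  let cells := (List.range n).flatMap (fun (r : Nat) => (List.range m).map (fun (c : Nat) => ((r : Int), (c : Int))))
  let scells := PySem.List.sorted cells (fun rc => mget matrix rc.1 rc.2) true
  let final := scells.foldl (fun dp rc => mset dp rc.1 rc.2 (bestOf matrix (n : Int) (m : Int) dp rc.1 rc.2)) dp0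
  mget final 0 0

-- ===== PRECONDITION & SPEC =====
-- Pre_ excludes empty matrices / empty first rows (A raises IndexError) and ragged matrices:
-- on a ragged matrix A raises IndexError whenever the search touches a missing cell, and may
-- return only accidentally when the increasing path avoids them, while B indexes every cell
-- of the rectangle; the rectangular matrix is the natural domain.
def Pre_longestIncreasingPathFromStart (matrix : List (List Int)) : Prop :=
  matrix ≠ [] ∧ matrix.getD 0 [] ≠ [] ∧ ∀ row ∈ matrix, row.length = (matrix.getD 0 []).length
instance (matrix : List (List Int)) : Decidable (Pre_longestIncreasingPathFromStart matrix) := by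
  unfold Pre_longestIncreasingPathFromStart; infer_instance

def pvWitness_longestIncreasingPathFromStart : List (List Int) := [[1, 2], [4, 3]]

def Spec_longestIncreasingPathFromStart (matrix : List (List Int)) (out : Int) : Prop := out = longestIncreasingPathFromStart_alt matrix
instance (matrix : List (List Int)) (out : Int) : Decidable (Spec_longestIncreasingPathFromStart matrix out) := by unfold Spec_longestIncreasingPathFromStart; infer_instance

-- ===== CLAIM (what is proved, stated in full; the proofs are below) =====
def Claim_equal_longestIncreasingPathFromStart : Prop := ∀ (matrix : List (List Int)), Dom_longestIncreasingPathFromStart matrix → Pre_longestIncreasingPathFromStart matrix → Spec_longestIncreasingPathFromStart matrix (longestIncreasingPathFromStart matrix)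

-- ===== LEMMAS AND PROOFS =====

-- the common specification: length of the longest strictly-increasing path from (r,c)
def lg (A : List (List Int)) (n m : Int) : Nat → Int → Int → Int
  | 0, _, _ => 1
  | fuel+1, r, c =>
    dirsA.foldl (fun mp d =>
      if 0 ≤ r + d.1 ∧ r + d.1 < n ∧ 0 ≤ c + d.2 ∧ c + d.2 < m ∧
          mget A (r + d.1) (c + d.2) > mget A r c
      then max mp (1 + lg A n m fuel (r + d.1) (c + d.2)) else mp) 1

def allCells (N M : Nat) : List (Int × Int) :=
  (List.range N).flatMap (fun (r : Nat) => (List.range M).map (fun (c : Nat) => ((r : Int), (c : Int))))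

def rank (A : List (List Int)) (N M : Nat) (r c : Int) : Nat :=
  (allCells N M).countP (fun p => mget A p.1 p.2 > mget A r c)

def Lv (A : List (List Int)) (N M : Nat) (r c : Int) : Int :=
  lg A (N : Int) (M : Int) (rank A N M r c + 1) r c

def Shape (N M : Nat) (dp : List (List Int)) : Prop :=
  dp.length = N ∧ ∀ row ∈ dp, row.length = M

lemma mem_allCells (N M : Nat) (p : Int × Int) :
    p ∈ allCells N M ↔ 0 ≤ p.1 ∧ p.1 < (N : Int) ∧ 0 ≤ p.2 ∧ p.2 < (M : Int) := by
  simp only [allCells, List.mem_flatMap, List.mem_map, List.mem_range]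
  constructor
  · rintro ⟨a, ha, b, hb, rfl⟩
    refine ⟨Int.natCast_nonneg a, ?_, Int.natCast_nonneg b, ?_⟩ <;> (simp; exact_mod_cast ‹_›)
  · rintro ⟨h0, h1, h2, h3⟩
    refine ⟨p.1.toNat, by omega, p.2.toNat, by omega, ?_⟩
    simp [Int.toNat_of_nonneg h0, Int.toNat_of_nonneg h2]

lemma nodup_allCells (N M : Nat) : (allCells N M).Nodup := by
  induction N with
  | zero => simp [allCells]
  | succ n ih =>
    have hsplit : allCells (n + 1) M =
        allCells n M ++ (List.range M).map (fun (c : Nat) => ((n : Int), (c : Int))) := by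
      simp [allCells, List.range_succ]
    rw [hsplit]
    refine List.Nodup.append ih ?_ ?_
    · refine List.Nodup.map ?_ List.nodup_range
      intro a b hab
      simpa using hab
    · intro p hp hp'
      have h1 := (mem_allCells n M p).mp hp
      obtain ⟨b, hb, rfl⟩ := List.mem_map.mp hp'
      omega

lemma length_allCells (N M : Nat) : (allCells N M).length = N * M := by
  induction N with
  | zero => simp [allCells]
  | succ n ih =>
    have hsplit : allCells (n + 1) M =
        allCells n M ++ (List.range M).map (fun (c : Nat) => ((n : Int), (c : Int))) := by
      simp [allCells, List.range_succ]
    rw [hsplit]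
    simp [ih, Nat.succ_mul]

lemma countP_lt {α : Type} (l : List α) (p q : α → Bool)
    (h : ∀ x ∈ l, p x = true → q x = true) (x : α) (hx : x ∈ l)
    (hqx : q x = true) (hpx : p x = false) : l.countP p < l.countP q := by
  induction l with
  | nil => cases hx
  | cons a t ih =>
    rcases List.mem_cons.mp hx with rfl | hxt
    · have hle : t.countP p ≤ t.countP q :=
        List.countP_mono_left (fun y hy hpy => h y (List.mem_cons_of_mem _ hy) hpy)
      rw [List.countP_cons, List.countP_cons, hpx, hqx]
      simp; omega
    · have hlt := ih (fun y hy hpy => h y (List.mem_cons_of_mem _ hy) hpy) hxt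
      have h2 := h a List.mem_cons_self
      rw [List.countP_cons, List.countP_cons]
      cases hpa : p a <;> cases hqa : q a <;> simp_all <;> try omega

lemma rank_lt_of_gt (A : List (List Int)) (N M : Nat) (r c rr cc : Int)
    (h0 : 0 ≤ rr) (h1 : rr < (N : Int)) (h2 : 0 ≤ cc) (h3 : cc < (M : Int))
    (hgt : mget A rr cc > mget A r c) : rank A N M rr cc < rank A N M r c := by
  unfold rank
  refine countP_lt (allCells N M) _ _ ?_ (rr, cc) ?_ ?_ ?_
  · intro x hx hpx
    simp only [decide_eq_true_eq] at hpx ⊢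
    omega
  · exact (mem_allCells N M (rr, cc)).mpr ⟨h0, h1, h2, h3⟩
  · simpa using hgt
  · simp

lemma rank_le_cells (A : List (List Int)) (N M : Nat) (r c : Int) : rank A N M r c ≤ N * M := by
  calc rank A N M r c ≤ (allCells N M).length := List.countP_le_length
    _ = N * M := length_allCells N M

lemma foldl_congr_step {α β : Type} (l : List α) (f g : β → α → β)
    (h : ∀ b a, a ∈ l → f b a = g b a) : ∀ b, l.foldl f b = l.foldl g b := by
  induction l with
  | nil => intro b; rfl
  | cons x t ih =>
    intro b
    rw [List.foldl_cons, List.foldl_cons, h b x List.mem_cons_self]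
    exact ih (fun b a ha => h b a (List.mem_cons_of_mem _ ha)) _

lemma lg_stab (A : List (List Int)) (N M : Nat) :
    ∀ (k f g : Nat) (r c : Int), rank A N M r c ≤ k → rank A N M r c < f → rank A N M r c < g →
      lg A (N : Int) (M : Int) f r c = lg A (N : Int) (M : Int) g r c := by
  intro k
  induction k with
  | zero =>
    intro f g r c h0 hf hg
    match f, g with
    | f' + 1, g' + 1 =>
      simp only [lg]
      apply foldl_congr_step
      intro b d hd
      by_cases hc : 0 ≤ r + d.1 ∧ r + d.1 < (N : Int) ∧ 0 ≤ c + d.2 ∧ c + d.2 < (M : Int) ∧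
          mget A (r + d.1) (c + d.2) > mget A r c
      · obtain ⟨x0, x1, x2, x3, xg⟩ := hc
        have := rank_lt_of_gt A N M r c (r + d.1) (c + d.2) x0 x1 x2 x3 xg
        omega
      · rw [if_neg hc, if_neg hc]
  | succ k ih =>
    intro f g r c h0 hf hg
    match f, g with
    | f' + 1, g' + 1 =>
      simp only [lg]
      apply foldl_congr_step
      intro b d hd
      by_cases hc : 0 ≤ r + d.1 ∧ r + d.1 < (N : Int) ∧ 0 ≤ c + d.2 ∧ c + d.2 < (M : Int) ∧
          mget A (r + d.1) (c + d.2) > mget A r c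
      · rw [if_pos hc, if_pos hc]
        obtain ⟨x0, x1, x2, x3, xg⟩ := hc
        have hlt := rank_lt_of_gt A N M r c (r + d.1) (c + d.2) x0 x1 x2 x3 xg
        rw [ih f' g' (r + d.1) (c + d.2) (by omega) (by omega) (by omega)]
      · rw [if_neg hc, if_neg hc]

lemma Lv_unfold (A : List (List Int)) (N M : Nat) (r c : Int) :
    Lv A N M r c = dirsA.foldl (fun mp d =>
      if 0 ≤ r + d.1 ∧ r + d.1 < (N : Int) ∧ 0 ≤ c + d.2 ∧ c + d.2 < (M : Int) ∧
          mget A (r + d.1) (c + d.2) > mget A r c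
      then max mp (1 + Lv A N M (r + d.1) (c + d.2)) else mp) 1 := by
  rw [show Lv A N M r c = lg A (N : Int) (M : Int) (rank A N M r c + 1) r c from rfl]
  simp only [lg]
  apply foldl_congr_step
  intro b d hd
  by_cases hc : 0 ≤ r + d.1 ∧ r + d.1 < (N : Int) ∧ 0 ≤ c + d.2 ∧ c + d.2 < (M : Int) ∧
      mget A (r + d.1) (c + d.2) > mget A r c
  · rw [if_pos hc, if_pos hc]
    obtain ⟨x0, x1, x2, x3, xg⟩ := hc
    have hlt := rank_lt_of_gt A N M r c (r + d.1) (c + d.2) x0 x1 x2 x3 xg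
    rw [lg_stab A N M (rank A N M (r + d.1) (c + d.2)) (rank A N M r c)
      (rank A N M (r + d.1) (c + d.2) + 1) (r + d.1) (c + d.2) le_rfl hlt (Nat.lt_succ_self _)]
    rfl
  · rw [if_neg hc, if_neg hc]

lemma shape_mset (N M : Nat) (dp : List (List Int)) (r c : Int) (v : Int)
    (h : Shape N M dp) (h0 : 0 ≤ r) (h1 : r < (N : Int)) : Shape N M (mset dp r c v) := by
  obtain ⟨hl, hrow⟩ := h
  have hrn : r.toNat < dp.length := by omega
  constructor
  · simp [mset, hl]
  · intro row hmem
    rcases List.mem_or_eq_of_mem_set hmem with hmem' | rfl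
    · exact hrow _ hmem'
    · rw [List.length_set, List.getD_eq_getElem dp [] hrn]
      exact hrow _ (List.getElem_mem hrn)

lemma mget_mset_self (N M : Nat) (dp : List (List Int)) (r c : Int) (v : Int)
    (h : Shape N M dp) (h0 : 0 ≤ r) (h1 : r < (N : Int)) (h2 : 0 ≤ c) (h3 : c < (M : Int)) :
    mget (mset dp r c v) r c = v := by
  obtain ⟨hl, hrow⟩ := h
  have hrn : r.toNat < dp.length := by omega
  have hrowlen : (dp.getD r.toNat []).length = M := by
    rw [List.getD_eq_getElem dp [] hrn]
    exact hrow _ (List.getElem_mem hrn)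
  have hcn : c.toNat < (dp.getD r.toNat []).length := by omega
  unfold mget mset
  have h1' : (dp.set r.toNat ((dp.getD r.toNat []).set c.toNat v)).getD r.toNat []
      = (dp.getD r.toNat []).set c.toNat v := by
    rw [List.getD_eq_getElem?_getD, List.getElem?_set, if_pos rfl, if_pos hrn]; rfl
  rw [h1', List.getD_eq_getElem?_getD, List.getElem?_set, if_pos rfl, if_pos hcn]; rfl

lemma mget_mset_ne (dp : List (List Int)) (r c r' c' : Int) (v : Int)
    (h : r.toNat ≠ r'.toNat ∨ c.toNat ≠ c'.toNat) :
    mget (mset dp r c v) r' c' = mget dp r' c' := by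
  unfold mget mset
  rcases h with hr | hc
  · have h1' : (dp.set r.toNat ((dp.getD r.toNat []).set c.toNat v)).getD r'.toNat []
        = dp.getD r'.toNat [] := by
      rw [List.getD_eq_getElem?_getD, List.getElem?_set, if_neg hr, ← List.getD_eq_getElem?_getD]
    rw [h1']
  · by_cases hr : r.toNat = r'.toNat
    · by_cases hlen : r.toNat < dp.length
      · have h1' : (dp.set r.toNat ((dp.getD r.toNat []).set c.toNat v)).getD r'.toNat []
            = (dp.getD r.toNat []).set c.toNat v := by
          rw [List.getD_eq_getElem?_getD, List.getElem?_set, if_pos hr, if_pos hlen]; rfl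
        rw [h1', List.getD_eq_getElem?_getD, List.getElem?_set, if_neg hc,
          ← List.getD_eq_getElem?_getD, hr]
      · have hnone : dp[r'.toNat]? = none := by
          rw [List.getElem?_eq_none_iff]; omega
        have h1' : (dp.set r.toNat ((dp.getD r.toNat []).set c.toNat v)).getD r'.toNat []
            = [] := by
          rw [List.getD_eq_getElem?_getD, List.getElem?_set, if_pos hr, if_neg hlen]; rfl
        have h2' : dp.getD r'.toNat [] = [] := by
          rw [List.getD_eq_getElem?_getD, hnone]; rfl
        rw [h1', h2']
    · have h1' : (dp.set r.toNat ((dp.getD r.toNat []).set c.toNat v)).getD r'.toNat []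
          = dp.getD r'.toNat [] := by
        rw [List.getD_eq_getElem?_getD, List.getElem?_set, if_neg hr, ← List.getD_eq_getElem?_getD]
      rw [h1']

def InvA (A : List (List Int)) (N M : Nat) (dp : List (List Int)) : Prop :=
  Shape N M dp ∧ ∀ r c : Int, 0 ≤ r → r < (N : Int) → 0 ≤ c → c < (M : Int) →
    mget dp r c = 0 ∨ mget dp r c = Lv A N M r c

lemma foldl_pair {σ : Type} (l : List (Int × Int)) (P : σ → Prop)
    (stepP : (Int × σ) → (Int × Int) → (Int × σ)) (stepI : Int → (Int × Int) → Int)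
    (h : ∀ acc d, d ∈ l → P acc.2 → (stepP acc d).1 = stepI acc.1 d ∧ P (stepP acc d).2) :
    ∀ acc : Int × σ, P acc.2 →
      (l.foldl stepP acc).1 = l.foldl stepI acc.1 ∧ P (l.foldl stepP acc).2 := by
  induction l with
  | nil => intro acc hP; exact ⟨rfl, hP⟩
  | cons d t ih =>
    intro acc hP
    have hd := h acc d List.mem_cons_self hP
    rw [List.foldl_cons, List.foldl_cons, ← hd.1]
    exact ih (fun a e he hp => h a e (List.mem_cons_of_mem _ he) hp) _ hd.2

lemma dfsA_correct (A : List (List Int)) (N M : Nat) :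
    ∀ (fuel : Nat) (r c : Int) (dp : List (List Int)), InvA A N M dp →
      0 ≤ r → r < (N : Int) → 0 ≤ c → c < (M : Int) → rank A N M r c < fuel →
      (dfsA A (N : Int) (M : Int) fuel r c dp).1 = Lv A N M r c ∧
        InvA A N M (dfsA A (N : Int) (M : Int) fuel r c dp).2 := by
  intro fuel
  induction fuel with
  | zero => intro r c dp hInv h0 h1 h2 h3 hrk; omega
  | succ fuel ih =>
    intro r c dp hInv h0 h1 h2 h3 hrk
    rw [dfsA]
    by_cases hmemo : mget dp r c ≠ 0
    · rw [if_pos hmemo]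
      rcases hInv.2 r c h0 h1 h2 h3 with hz | hLv
      · exact absurd hz hmemo
      · exact ⟨hLv, hInv⟩
    · rw [if_neg hmemo]
      have H := foldl_pair (σ := List (List Int)) dirsA (InvA A N M)
        (fun acc d =>
          if 0 ≤ r + d.1 ∧ r + d.1 < (N : Int) ∧ 0 ≤ c + d.2 ∧ c + d.2 < (M : Int) then
            if mget A (r + d.1) (c + d.2) > mget A r c then
              let p := dfsA A (N : Int) (M : Int) fuel (r + d.1) (c + d.2) acc.2
              (max acc.1 (1 + p.1), p.2)
            else acc
          else acc)
        (fun mp d =>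
          if 0 ≤ r + d.1 ∧ r + d.1 < (N : Int) ∧ 0 ≤ c + d.2 ∧ c + d.2 < (M : Int) ∧
              mget A (r + d.1) (c + d.2) > mget A r c
          then max mp (1 + Lv A N M (r + d.1) (c + d.2)) else mp)
        (by
          intro acc d hd hP
          beta_reduce
          by_cases hb : 0 ≤ r + d.1 ∧ r + d.1 < (N : Int) ∧ 0 ≤ c + d.2 ∧ c + d.2 < (M : Int)
          · rw [if_pos hb]
            by_cases hg : mget A (r + d.1) (c + d.2) > mget A r c
            · rw [if_pos hg]
              obtain ⟨hb0, hb1, hb2, hb3⟩ := hb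
              have hrk' : rank A N M (r + d.1) (c + d.2) < fuel := by
                have := rank_lt_of_gt A N M r c (r + d.1) (c + d.2) hb0 hb1 hb2 hb3 hg
                omega
              obtain ⟨hv, hI⟩ := ih (r + d.1) (c + d.2) acc.2 hP hb0 hb1 hb2 hb3 hrk'
              refine ⟨?_, hI⟩
              show max acc.1 (1 + (dfsA A (N : Int) (M : Int) fuel (r + d.1) (c + d.2) acc.2).1) = _
              rw [hv, if_pos ⟨hb0, hb1, hb2, hb3, hg⟩]
            · rw [if_neg hg]
              exact ⟨by rw [if_neg (by tauto)], hP⟩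
          · rw [if_neg hb]
            exact ⟨by rw [if_neg (by tauto)], hP⟩) (1, dp) hInv
      dsimp only
      refine ⟨?_, ?_⟩
      · show (List.foldl _ (1, dp) dirsA).1 = _
        rw [H.1, ← Lv_unfold]
      · show InvA A N M (mset (List.foldl _ (1, dp) dirsA).2 r c (List.foldl _ (1, dp) dirsA).1)
        refine ⟨shape_mset N M _ r c _ H.2.1 h0 h1, ?_⟩
        intro r' c' g0 g1 g2 g3
        by_cases heq : r'.toNat = r.toNat ∧ c'.toNat = c.toNat
        · have hr' : r' = r := by omega
          have hc' : c' = c := by omega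
          subst hr'; subst hc'
          rw [mget_mset_self N M _ r' c' _ H.2.1 g0 g1 g2 g3]
          right
          rw [H.1, ← Lv_unfold]
        · rw [mget_mset_ne _ r c r' c' _ (by omega)]
          exact H.2.2 r' c' g0 g1 g2 g3

lemma bestOf_correct (A : List (List Int)) (N M : Nat) (dp : List (List Int)) (r c : Int)
    (h : ∀ rr cc : Int, 0 ≤ rr → rr < (N : Int) → 0 ≤ cc → cc < (M : Int) →
      mget A rr cc > mget A r c → mget dp rr cc = Lv A N M rr cc) :
    bestOf A (N : Int) (M : Int) dp r c = Lv A N M r c := by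
  unfold bestOf
  have hcongr := foldl_congr_step (nbrs r c)
    (fun best nb =>
      if 0 ≤ nb.1 ∧ nb.1 < (N : Int) ∧ 0 ≤ nb.2 ∧ nb.2 < (M : Int) ∧ mget A nb.1 nb.2 > mget A r c
      then max best (1 + mget dp nb.1 nb.2) else best)
    (fun best nb =>
      if 0 ≤ nb.1 ∧ nb.1 < (N : Int) ∧ 0 ≤ nb.2 ∧ nb.2 < (M : Int) ∧ mget A nb.1 nb.2 > mget A r c
      then max best (1 + Lv A N M nb.1 nb.2) else best)
    (by
      intro b nb hnb
      beta_reduce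
      by_cases hc : 0 ≤ nb.1 ∧ nb.1 < (N : Int) ∧ 0 ≤ nb.2 ∧ nb.2 < (M : Int) ∧
          mget A nb.1 nb.2 > mget A r c
      · rw [if_pos hc, if_pos hc, h nb.1 nb.2 hc.1 hc.2.1 hc.2.2.1 hc.2.2.2.1 hc.2.2.2.2]
      · rw [if_neg hc, if_neg hc]) 1
  rw [hcongr, Lv_unfold]
  simp only [nbrs, dirsA, List.foldl_cons, List.foldl_nil, sub_eq_add_neg, add_zero]

lemma foldB_inv (A : List (List Int)) (N M : Nat) :
    ∀ (l : List (Int × Int)) (dp : List (List Int)), Shape N M dp →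
      l.Pairwise (fun a b => mget A b.1 b.2 ≤ mget A a.1 a.2) →
      (∀ p ∈ l, p ∈ allCells N M) → l.Nodup →
      (∀ q ∈ allCells N M, q ∉ l → mget dp q.1 q.2 = Lv A N M q.1 q.2) →
      ∀ q ∈ allCells N M,
        mget (l.foldl (fun dp rc => mset dp rc.1 rc.2 (bestOf A (N : Int) (M : Int) dp rc.1 rc.2)) dp) q.1 q.2 =
          Lv A N M q.1 q.2 := by
  intro l
  induction l with
  | nil =>
    intro dp hS hPW hsub hnd hdone q hq
    exact hdone q hq (List.not_mem_nil)
  | cons p t ih =>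
    intro dp hS hPW hsub hnd hdone q hq
    rw [List.foldl_cons]
    have hpb := (mem_allCells N M p).mp (hsub p List.mem_cons_self)
    have hbest : bestOf A (N : Int) (M : Int) dp p.1 p.2 = Lv A N M p.1 p.2 := by
      apply bestOf_correct
      intro rr cc k0 k1 k2 k3 kg
      have hmem : (rr, cc) ∈ allCells N M := (mem_allCells N M (rr, cc)).mpr ⟨k0, k1, k2, k3⟩
      have hnotin : (rr, cc) ∉ p :: t := by
        intro hin
        rcases List.mem_cons.mp hin with heq | hint
        · rw [← heq] at kg
          exact absurd kg (lt_irrefl _)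
        · have h2 := (List.pairwise_cons.mp hPW).1 _ hint
          simp only at h2
          omega
      exact hdone (rr, cc) hmem hnotin
    apply ih (mset dp p.1 p.2 (bestOf A (N : Int) (M : Int) dp p.1 p.2))
      (shape_mset N M dp p.1 p.2 _ hS hpb.1 hpb.2.1)
      (List.pairwise_cons.mp hPW).2
      (fun x hx => hsub x (List.mem_cons_of_mem _ hx))
      (List.nodup_cons.mp hnd).2
      ?_ q hq
    intro q' hq' hq't
    by_cases heq : q' = p
    · subst heq
      rw [mget_mset_self N M dp q'.1 q'.2 _ hS hpb.1 hpb.2.1 hpb.2.2.1 hpb.2.2.2, hbest]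
    · have hq'b := (mem_allCells N M q').mp hq'
      have hdiff : q'.1 ≠ p.1 ∨ q'.2 ≠ p.2 := by
        by_contra hcon
        rw [not_or, not_not, not_not] at hcon
        exact heq (Prod.ext hcon.1 hcon.2)
      rw [mget_mset_ne dp p.1 p.2 q'.1 q'.2 _ (by omega)]
      apply hdone q' hq'
      intro hin
      rcases List.mem_cons.mp hin with he | ht
      · exact heq he
      · exact hq't ht

-- ===== VERDICT (by name: the statement is the Claim_ definition above) =====
theorem longestIncreasingPathFromStart_spec : Claim_equal_longestIncreasingPathFromStart := by
  intro matrix hdom hpre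
  obtain ⟨hne, hrow0, hrect⟩ := hpre
  have hN : 0 < matrix.length := List.length_pos_iff.mpr hne
  have hM : 0 < (matrix.getD 0 []).length := List.length_pos_iff.mpr hrow0
  unfold Spec_longestIncreasingPathFromStart
  unfold longestIncreasingPathFromStart longestIncreasingPathFromStart_alt
  dsimp only
  have hzrow : ∀ (n m : Nat) (x : List Int) (i : Nat),
      (List.replicate n x).getD i [] = x ∨ (List.replicate n x).getD i [] = [] := by
    intro n m x i
    by_cases hi : i < n
    · left
      rw [List.getD_eq_getElem _ _ (by simpa using hi), List.getElem_replicate]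
    · right
      rw [List.getD_eq_getElem?_getD, List.getElem?_eq_none (by simpa using Nat.le_of_not_lt hi)]
      rfl
  have hzcol : ∀ (m : Nat) (j : Nat), (List.replicate m (0 : Int)).getD j 0 = 0 := by
    intro m j
    by_cases hj : j < m
    · rw [List.getD_eq_getElem _ _ (by simpa using hj), List.getElem_replicate]
    · rw [List.getD_eq_getElem?_getD, List.getElem?_eq_none (by simpa using Nat.le_of_not_lt hj)]
      rfl
  have hz : ∀ r c : Int,
      mget (List.replicate matrix.length (List.replicate (matrix.getD 0 []).length (0 : Int))) r c = 0 := by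
    intro r c
    unfold mget
    rcases hzrow matrix.length (matrix.getD 0 []).length
        (List.replicate (matrix.getD 0 []).length (0 : Int)) r.toNat with he | he <;> rw [he]
    · exact hzcol _ _
    · rfl
  have hShape0 : Shape matrix.length (matrix.getD 0 []).length
      (List.replicate matrix.length (List.replicate (matrix.getD 0 []).length (0 : Int))) := by
    constructor
    · simp
    · intro row hrow
      rw [List.eq_of_mem_replicate hrow]
      simp
  have hInv0 : InvA matrix matrix.length (matrix.getD 0 []).length
      (List.replicate matrix.length (List.replicate (matrix.getD 0 []).length (0 : Int))) := by
    refine ⟨hShape0, ?_⟩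
    intro r c _ _ _ _
    exact Or.inl (hz r c)
  have HA := dfsA_correct matrix matrix.length (matrix.getD 0 []).length
    (matrix.length * (matrix.getD 0 []).length + 1) 0 0 _ hInv0
    le_rfl (by exact_mod_cast hN) le_rfl (by exact_mod_cast hM)
    (by have := rank_le_cells matrix matrix.length (matrix.getD 0 []).length 0 0; omega)
  rw [HA.1]
  have hmem00 : ((0 : Int), (0 : Int)) ∈ allCells matrix.length (matrix.getD 0 []).length := by
    refine (mem_allCells _ _ _).mpr
      ⟨le_rfl, by show (0 : Int) < (matrix.length : Int); exact_mod_cast hN,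
        le_rfl, by show (0 : Int) < ((matrix.getD 0 []).length : Int); exact_mod_cast hM⟩
  have HB := foldB_inv matrix matrix.length (matrix.getD 0 []).length
    (PySem.List.sorted (allCells matrix.length (matrix.getD 0 []).length)
      (fun rc => mget matrix rc.1 rc.2) true)
    (List.replicate matrix.length (List.replicate (matrix.getD 0 []).length (0 : Int)))
    hShape0
    (PySem.List.sorted_pairwise_rev _ _)
    (fun p hp => ((PySem.List.mem_sorted _ _ _ _).mp hp))
    ((PySem.List.sorted_perm _ _ _).nodup_iff.mpr
      (nodup_allCells matrix.length (matrix.getD 0 []).length))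
    (fun q hq hnot => absurd ((PySem.List.mem_sorted _ _ _ _).mpr hq) hnot)
    ((0 : Int), (0 : Int)) hmem00
  exact HB.symm
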